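-- pv_equiv track=rewrite | github.com/shaharharel/edit-rna-apobec | src/utils/splits.py | _has_kozak
-- ===== SOURCE A (Python) =====
-- def _has_kozak(seq: str) -> bool:
--     """Check for Kozak consensus."""
--     seq = seq.upper().replace('T', 'U')
--     # Look for strong Kozak or partial matches
--     if 'ACCAUGG' in seq or 'GCCAUGG' in seq:
--         return True
--     # Weaker check: A/G at -3 and G at +4
--     for i in range(len(seq) - 6):
--         if seq[i:i+3] == 'AUG':
--             if i >= 3 and seq[i-3] in 'AG':
--                 return True
--     return False
-- ===== SOURCE B (Python) =====
-- import re
--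
-- # One compiled regex: strong Kozak ([AG]CCAUGG) or weak Kozak (A/G at -3, AUG,
-- # and four trailing characters, reproducing A's range(len-6) bound). DOTALL so
-- # '.' matches any character, as A's index checks do.
-- _KOZAK_RE = re.compile(r'[AG]CCAUGG|[AG]..AUG....', re.DOTALL)
--
--
-- def _has_kozak(seq: str) -> bool:
--     """Check for Kozak consensus."""
--     seq = seq.upper().replace('T', 'U')
--     return bool(_KOZAK_RE.search(seq))
-- ===== Notes on version B (the rewrite author's own statement) =====
-- stated objective: faster
-- what changed: Replaces the two substring tests plus the explicit index loop with lookback by a single precompiled regex search r'[AG]CCAUGG|[AG]..AUG....' (DOTALL) that encodes both the strong and the weak Kozak condition, the four trailing dots reproducing A's range(len(seq)-6) bound.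
import Mathlib
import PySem

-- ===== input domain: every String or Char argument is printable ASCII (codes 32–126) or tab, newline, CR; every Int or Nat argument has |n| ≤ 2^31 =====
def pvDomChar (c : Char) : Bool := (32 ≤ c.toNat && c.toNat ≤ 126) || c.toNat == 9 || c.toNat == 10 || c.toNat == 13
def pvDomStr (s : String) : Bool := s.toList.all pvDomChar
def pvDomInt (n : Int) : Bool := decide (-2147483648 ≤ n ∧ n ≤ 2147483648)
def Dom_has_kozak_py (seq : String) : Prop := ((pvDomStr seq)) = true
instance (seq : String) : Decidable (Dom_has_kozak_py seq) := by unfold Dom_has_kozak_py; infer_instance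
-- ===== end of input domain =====

-- B replaces A's two substring tests plus explicit index loop with lookback by a single regex search
-- r'[AG]CCAUGG|[AG]..AUG....' (DOTALL); objective: faster (compiled regex engine vs per-character Python loop).

-- ===== PORT A =====
-- A's weak-Kozak loop: for i in range(len(seq) - 6): if seq[i:i+3] == 'AUG': if i >= 3 and seq[i-3] in 'AG': return True
-- (the membership "seq[i-3] in 'AG'" of a one-character string is ported as the character being 'A' or 'G';
--  the index read seq[i-3] uses pyGet?, whose none case — unreachable under the guards — yields false)
def pvAWeakLoop (L : List Char) : List Int → Bool
  | [] => false
  | i :: rest =>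
    if PySem.List.slice L (some i) (some (i + 3)) = ['A', 'U', 'G'] then
      if i ≥ 3 && (match PySem.List.pyGet? L (i - 3) with
                   | some c => c == 'A' || c == 'G'
                   | none => false) then
        true
      else pvAWeakLoop L rest
    else pvAWeakLoop L rest

def has_kozak_py (seq : String) : Bool :=
  let L := PySem.Chars.replace (PySem.Chars.upper seq.toList) ['T'] ['U']
  if PySem.Chars.isIn ['A','C','C','A','U','G','G'] L
      || PySem.Chars.isIn ['G','C','C','A','U','G','G'] L then
    true
  else
    pvAWeakLoop L (PySem.List.pyRange 0 ((L.length : Int) - 6) 1)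

-- ===== PORT B =====
-- Hand-port of B's compiled regex r'[AG]CCAUGG|[AG]..AUG....' with re.DOTALL, searched by trying every
-- start position left to right. Exact: the pattern has no quantifiers, so a match attempt at position p
-- is exactly these per-position character tests ('[AG]' = the character there is 'A' or 'G', a literal
-- character compares equal, '.' under DOTALL only requires the position to exist), and re.search finds
-- a match iff some start position matches.
def pvLitAt (L : List Char) (p : Nat) : List Char → Bool
  | [] => true
  | c :: cs => match L[p]? with
      | some d => d == c && pvLitAt L (p + 1) cs
      | none => false

def pvAnyAt (L : List Char) (p : Nat) : Bool := decide (p < L.length)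

def pvClassAGAt (L : List Char) (p : Nat) : Bool :=
  match L[p]? with
  | some d => d == 'A' || d == 'G'
  | none => false

def pvKozakMatchAt (L : List Char) (p : Nat) : Bool :=
  (pvClassAGAt L p && pvLitAt L (p + 1) ['C','C','A','U','G','G'])
  || (pvClassAGAt L p && pvAnyAt L (p + 1) && pvAnyAt L (p + 2)
      && pvLitAt L (p + 3) ['A','U','G']
      && pvAnyAt L (p + 6) && pvAnyAt L (p + 7) && pvAnyAt L (p + 8) && pvAnyAt L (p + 9))

def has_kozak_py_alt (seq : String) : Bool :=
  let L := PySem.Chars.replace (PySem.Chars.upper seq.toList) ['T'] ['U']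
  (List.range L.length).any (pvKozakMatchAt L)

-- ===== PRECONDITION & SPEC =====
def Spec_has_kozak_py (seq : String) (out : Bool) : Prop := out = has_kozak_py_alt seq
instance (seq : String) (out : Bool) : Decidable (Spec_has_kozak_py seq out) := by unfold Spec_has_kozak_py; infer_instance

-- ===== CLAIM (what is proved, stated in full; the proofs are below) =====
def Claim_equal_has_kozak_py : Prop := ∀ (seq : String), Dom_has_kozak_py seq → Spec_has_kozak_py seq (has_kozak_py seq)

-- ===== LEMMAS AND PROOFS =====

-- A's weak loop over an index list is an `any` of its per-index condition.
theorem pvAWeakLoop_eq_any (L : List Char) (l : List Int) :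
    pvAWeakLoop L l = l.any (fun i =>
      decide (PySem.List.slice L (some i) (some (i + 3)) = ['A', 'U', 'G']) &&
      (decide (i ≥ 3) && (match PySem.List.pyGet? L (i - 3) with
                          | some c => c == 'A' || c == 'G'
                          | none => false))) := by
  induction l with
  | nil => rfl
  | cons i rest ih =>
    rw [pvAWeakLoop, List.any_cons, ← ih]
    split_ifs with h1 h2
    · simp [h1, h2]
    · simp [h1, h2]
    · simp [h1]

-- Semantic reading of the second regex alternative at position p.
def pvAlt2P (L : List Char) (p : Nat) : Prop :=
  pvClassAGAt L p = true ∧ ['A','U','G'] <+: L.drop (p + 3) ∧ p + 9 < L.length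

-- Semantic reading of the first regex alternative at position p.
def pvAlt1P (L : List Char) (p : Nat) : Prop :=
  ['A','C','C','A','U','G','G'] <+: L.drop p ∨ ['G','C','C','A','U','G','G'] <+: L.drop p

theorem pv_weak_iff (L : List Char) :
    pvAWeakLoop L (PySem.List.pyRange 0 ((L.length : Int) - 6) 1) = true ↔ ∃ p, pvAlt2P L p := by
  rw [pvAWeakLoop_eq_any, List.any_eq_true]
  constructor
  · rintro ⟨i, hi, hcond⟩
    rw [PySem.List.mem_pyRange_one] at hi
    obtain ⟨h0, hib⟩ := hi
    simp only [Bool.and_eq_true, decide_eq_true_eq] at hcond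
    obtain ⟨hslice, hge, hmatch⟩ := hcond
    refine ⟨i.toNat - 3, ?_, ?_, ?_⟩
    · have he : i - 3 = ((i.toNat - 3 : Nat) : Int) := by omega
      rw [he, PySem.List.pyGet?_natCast] at hmatch
      exact hmatch
    · have ht : i.toNat - 3 + 3 = i.toNat := by omega
      rw [ht]
      rw [PySem.List.slice_toNat L h0 (by omega)] at hslice
      have h3 : (i + 3).toNat - i.toNat = 3 := by omega
      rw [h3] at hslice
      rw [List.prefix_iff_eq_take]
      exact hslice.symm
    · omega
  · rintro ⟨p, hc, hpre, hlen⟩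
    refine ⟨(p : Int) + 3, ?_, ?_⟩
    · rw [PySem.List.mem_pyRange_one]
      constructor <;> omega
    · simp only [Bool.and_eq_true, decide_eq_true_eq]
      refine ⟨?_, by omega, ?_⟩
      · rw [PySem.List.slice_toNat L (by omega) (by omega)]
        have h3 : ((p : Int) + 3 + 3).toNat - ((p : Int) + 3).toNat = 3 := by omega
        have h4 : ((p : Int) + 3).toNat = p + 3 := by omega
        rw [h3, h4]
        rw [List.prefix_iff_eq_take] at hpre
        exact hpre.symm
      · have he : (p : Int) + 3 - 3 = ((p : Nat) : Int) := by omega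
        rw [he, PySem.List.pyGet?_natCast]
        exact hc

theorem pvLitAt_iff (L : List Char) (cs : List Char) (p : Nat) :
    pvLitAt L p cs = true ↔ cs <+: L.drop p := by
  induction cs generalizing p with
  | nil => simp [pvLitAt]
  | cons c cs ih =>
    cases h : L[p]? with
    | none =>
      have hlen := List.getElem?_eq_none_iff.mp h
      have hd : L.drop p = [] := by simp [List.drop_eq_nil_iff]; omega
      simp only [pvLitAt, h, hd]
      simp
    | some d =>
      obtain ⟨hp, hv⟩ := List.getElem?_eq_some_iff.mp h
      have hd : L.drop p = d :: L.drop (p + 1) := by rw [← List.getElem_cons_drop hp, hv]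
      rw [hd]
      simp only [pvLitAt, h, Bool.and_eq_true, beq_iff_eq, List.cons_prefix_cons, ih]
      tauto

theorem pv_alt1_iff (L : List Char) (p : Nat) :
    (pvClassAGAt L p && pvLitAt L (p + 1) ['C','C','A','U','G','G']) = true ↔ pvAlt1P L p := by
  unfold pvAlt1P
  cases h : L[p]? with
  | none =>
    have hlen := List.getElem?_eq_none_iff.mp h
    have hd : L.drop p = [] := by simp [List.drop_eq_nil_iff]; omega
    simp [pvClassAGAt, h, hd]
  | some d =>
    obtain ⟨hp, hv⟩ := List.getElem?_eq_some_iff.mp h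
    have hd : L.drop p = d :: L.drop (p + 1) := by rw [← List.getElem_cons_drop hp, hv]
    rw [hd]
    simp only [pvClassAGAt, h, Bool.and_eq_true, Bool.or_eq_true, beq_iff_eq,
      List.cons_prefix_cons, pvLitAt_iff]
    tauto

theorem pv_alt2_iff (L : List Char) (p : Nat) :
    (pvClassAGAt L p && pvAnyAt L (p + 1) && pvAnyAt L (p + 2)
      && pvLitAt L (p + 3) ['A','U','G']
      && pvAnyAt L (p + 6) && pvAnyAt L (p + 7) && pvAnyAt L (p + 8) && pvAnyAt L (p + 9)) = true
    ↔ pvAlt2P L p := by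
  unfold pvAlt2P
  simp only [Bool.and_eq_true, pvAnyAt, decide_eq_true_eq, pvLitAt_iff]
  constructor
  · rintro ⟨⟨⟨⟨⟨⟨⟨hc, _⟩, _⟩, hl⟩, _⟩, _⟩, _⟩, h9⟩
    exact ⟨hc, hl, h9⟩
  · rintro ⟨hc, hl, h9⟩
    exact ⟨⟨⟨⟨⟨⟨⟨hc, by omega⟩, by omega⟩, hl⟩, by omega⟩, by omega⟩, by omega⟩, h9⟩

theorem pv_alt1_lt (L : List Char) (p : Nat) (h : pvAlt1P L p) : p < L.length := by
  by_contra hge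
  have hd : L.drop p = [] := by simp [List.drop_eq_nil_iff]; omega
  rcases h with h | h <;> rw [hd] at h <;> simp [List.prefix_nil] at h

theorem pv_rhs_iff (L : List Char) :
    (List.range L.length).any (pvKozakMatchAt L) = true ↔
      (∃ p, pvAlt1P L p) ∨ (∃ p, pvAlt2P L p) := by
  simp only [List.any_eq_true, List.mem_range]
  constructor
  · rintro ⟨p, _, hm⟩
    rcases (Bool.or_eq_true _ _).mp hm with h | h
    · exact Or.inl ⟨p, (pv_alt1_iff L p).mp h⟩
    · exact Or.inr ⟨p, (pv_alt2_iff L p).mp h⟩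
  · rintro (⟨p, h⟩ | ⟨p, h⟩)
    · exact ⟨p, pv_alt1_lt L p h, (Bool.or_eq_true _ _).mpr (Or.inl ((pv_alt1_iff L p).mpr h))⟩
    · exact ⟨p, by have := h.2.2; omega, (Bool.or_eq_true _ _).mpr (Or.inr ((pv_alt2_iff L p).mpr h))⟩

theorem pv_strong_iff (L : List Char) :
    (PySem.Chars.isIn ['A','C','C','A','U','G','G'] L
      || PySem.Chars.isIn ['G','C','C','A','U','G','G'] L) = true ↔ ∃ p, pvAlt1P L p := by
  simp only [Bool.or_eq_true, ← PySem.Chars.exists_prefix_drop_iff_isIn, pvAlt1P]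
  exact exists_or.symm

theorem pv_main (L : List Char) :
    (if PySem.Chars.isIn ['A','C','C','A','U','G','G'] L
        || PySem.Chars.isIn ['G','C','C','A','U','G','G'] L then
      true
    else
      pvAWeakLoop L (PySem.List.pyRange 0 ((L.length : Int) - 6) 1))
    = (List.range L.length).any (pvKozakMatchAt L) := by
  rw [Bool.eq_iff_iff]
  split_ifs with hs
  · simp only [true_iff]
    exact (pv_rhs_iff L).mpr (Or.inl ((pv_strong_iff L).mp hs))
  · rw [pv_weak_iff, pv_rhs_iff]
    constructor
    · exact Or.inr
    · rintro (h | h)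
      · exact absurd ((pv_strong_iff L).mpr h) hs
      · exact h

-- ===== VERDICT (by name: the statement is the Claim_ definition above) =====
theorem has_kozak_py_spec : Claim_equal_has_kozak_py := by
  intro seq _
  unfold Spec_has_kozak_py has_kozak_py has_kozak_py_alt
  exact pv_main _
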